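-- pv_equiv track=rewrite | github.com/ron-rivest/2018-rcv-audits | rcv.py | count_first_choices
-- ===== SOURCE A (Python) =====
-- def count_first_choices(L):
--     """
--     Return dict giving count of all first choices in ballot list L.
--
--     Args:
--         L (list): list of ballots
--
--     Returns:
--         (dict): dictionary mapping all choices that occur at least once
--             as a first choice to count of their number of choices.
--
--     Example:
--         >>> L = [('a', 'b'), ('c'), (), ('d'), ('a')]
--         >>> count_first_choices(L)
--         {'a': 2, 'b': 0, 'c': 1, 'd': 1}
--     """
--
--     d = dict()
--     for ballot in L:
--         for choice in ballot:
--             if choice not in d: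
--                 d[choice] = 0
--         if len(ballot)>0:
--             first_choice = ballot[0]
--             d[first_choice] = 1 + d[first_choice]
--
--     return d
-- ===== SOURCE B (Python) =====
-- def count_first_choices(L):
--     keys = dict.fromkeys(c for ballot in L for c in ballot)
--     return {k: sum(1 for b in L if b and b[0] == k) for k in keys}
-- ===== Notes on version B (the rewrite author's own statement) =====
-- stated objective: alternative
-- what changed: B drops A's incremental counter dict entirely: it first deduplicates all choices in first-occurrence order with dict.fromkeys, then computes each key's count independently by a per-key scan over L summing ballots whose first element equals the key.
import Mathlib
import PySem

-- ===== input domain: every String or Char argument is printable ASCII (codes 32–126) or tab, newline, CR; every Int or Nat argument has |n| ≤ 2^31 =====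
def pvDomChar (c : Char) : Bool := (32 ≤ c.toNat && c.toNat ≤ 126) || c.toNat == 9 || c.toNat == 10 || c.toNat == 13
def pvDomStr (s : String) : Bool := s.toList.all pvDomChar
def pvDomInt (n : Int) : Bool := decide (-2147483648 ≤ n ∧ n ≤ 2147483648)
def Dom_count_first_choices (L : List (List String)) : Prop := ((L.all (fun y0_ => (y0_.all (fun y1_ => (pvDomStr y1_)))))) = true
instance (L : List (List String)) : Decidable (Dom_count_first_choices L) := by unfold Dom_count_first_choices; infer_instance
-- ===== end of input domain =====

-- B drops A's incremental counter dict: it deduplicates all choices in first-occurrence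
-- order, then computes each key's count independently by a per-key scan over L.

-- ===== PORT A =====
-- inner loop: 'for choice in ballot: if choice not in d: d[choice] = 0'
def pvRegA (d : PySem.Dict String Int) (ballot : List String) : PySem.Dict String Int :=
  ballot.foldl (fun d c => if d.contains c then d else d.insert c 0) d

-- one iteration of A's outer loop; 'd[first] = 1 + d[first]' is modify (the first choice is
-- always present after registration, so Python's d[first] lookup cannot raise; modify is exact here)
def pvStepA (d : PySem.Dict String Int) (ballot : List String) : PySem.Dict String Int :=
  let d1 := pvRegA d ballot
  if 0 < ballot.length then
    d1.modify (PySem.List.pyGetD ballot 0 "") 0 (fun v => 1 + v)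
  else d1

def count_first_choices (L : List (List String)) : List (String × Int) :=
  (L.foldl pvStepA PySem.Dict.empty).items

-- ===== PORT B =====
-- keys = dict.fromkeys(c for ballot in L for c in ballot)  (order-preserving dedup)
def pvKeysB (L : List (List String)) : List String :=
  PySem.Set.ofList (L.flatMap (fun b => b))

-- sum(1 for b in L if b and b[0] == k)
def pvCountFirstB (L : List (List String)) (k : String) : Int :=
  L.foldl (fun acc b => if 0 < b.length && PySem.List.pyGetD b 0 "" == k then acc + 1 else acc) 0

-- {k: sum(...) for k in keys}: keys are distinct, so the dict's items are exactly this map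
def count_first_choices_alt (L : List (List String)) : List (String × Int) :=
  (pvKeysB L).map (fun k => (k, pvCountFirstB L k))

-- ===== PRECONDITION & SPEC =====
def Spec_count_first_choices (L : List (List String)) (out : List (String × Int)) : Prop := out = count_first_choices_alt L
instance (L : List (List String)) (out : List (String × Int)) : Decidable (Spec_count_first_choices L out) := by unfold Spec_count_first_choices; infer_instance

-- ===== CLAIM (what is proved, stated in full; the proofs are below) =====
def Claim_equal_count_first_choices : Prop := ∀ (L : List (List String)), Dom_count_first_choices L → Spec_count_first_choices L (count_first_choices L)

-- ===== LEMMAS AND PROOFS =====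

-- the multiset of first choices of nonempty ballots (proof-side abbreviation)
def pvFirsts (L : List (List String)) : List String :=
  (L.filter (fun b => 0 < b.length)).map (fun b => PySem.List.pyGetD b 0 "")

theorem pvRegA_contains_mono (b : List String) (d : PySem.Dict String Int) (k : String)
    (h : d.contains k = true) : (pvRegA d b).contains k = true := by
  induction b generalizing d with
  | nil => exact h
  | cons c bs ih =>
    simp only [pvRegA, List.foldl_cons] at *
    by_cases hd : d.contains c
    · rw [if_pos hd]; exact ih d h
    · rw [if_neg hd]
      apply ih
      rw [PySem.Dict.contains_insert]
      simp [h]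

theorem pvRegA_contains (b : List String) (d : PySem.Dict String Int) (k : String)
    (hk : k ∈ b) : (pvRegA d b).contains k = true := by
  induction b generalizing d with
  | nil => cases hk
  | cons c bs ih =>
    simp only [pvRegA, List.foldl_cons] at *
    by_cases hd : d.contains c
    · rw [if_pos hd]
      rcases List.mem_cons.mp hk with rfl | hmem
      · exact pvRegA_contains_mono bs d k hd
      · exact ih d hmem
    · rw [if_neg hd]
      rcases List.mem_cons.mp hk with rfl | hmem
      · exact pvRegA_contains_mono bs _ k (PySem.Dict.contains_insert_self d k 0)
      · exact ih _ hmem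

theorem pvRegA_keys (b : List String) (d : PySem.Dict String Int) :
    (pvRegA d b).keys = PySem.Set.update d.keys b := by
  induction b generalizing d with
  | nil => simp [pvRegA, PySem.Set.update_nil]
  | cons c bs ih =>
    simp only [pvRegA, List.foldl_cons] at *
    rw [PySem.Set.update_cons]
    by_cases h : d.contains c
    · rw [if_pos h, ih]
      have hmem : c ∈ d.keys := (PySem.Dict.contains_iff_mem_keys d c).mp h
      have : PySem.Set.add d.keys c = d.keys := by
        simp [PySem.Set.add, PySem.Set.contains, hmem]
      rw [this]
    · rw [if_neg h, ih]
      have hf : d.contains c = false := by simpa using h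
      have hnm : c ∉ d.keys := fun hm => h ((PySem.Dict.contains_iff_mem_keys d c).mpr hm)
      congr 1
      rw [PySem.Dict.keys_insert_of_not_contains d 0 hf]
      simp [PySem.Set.add, PySem.Set.contains, hnm]

theorem pvRegA_getD (b : List String) (d : PySem.Dict String Int) (k : String) :
    (pvRegA d b).getD k 0 = d.getD k 0 := by
  induction b generalizing d with
  | nil => rfl
  | cons c bs ih =>
    simp only [pvRegA, List.foldl_cons] at *
    by_cases h : d.contains c
    · rw [if_pos h, ih]
    · rw [if_neg h, ih, PySem.Dict.getD_insert]
      split_ifs with hk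
      · subst hk
        exact (PySem.Dict.getD_of_not_contains d 0 (by simpa using h)).symm
      · rfl

theorem pvStepA_keys (b : List String) (d : PySem.Dict String Int) :
    (pvStepA d b).keys = PySem.Set.update d.keys b := by
  unfold pvStepA
  split_ifs with h
  · obtain ⟨c, bs, rfl⟩ : ∃ c bs, b = c :: bs := by
      cases b with
      | nil => simp at h
      | cons c bs => exact ⟨c, bs, rfl⟩
    rw [PySem.Dict.keys_modify, PySem.List.pyGetD_zero_cons]
    rw [PySem.Dict.keys_insert_of_contains _ _ (pvRegA_contains _ d c (List.mem_cons_self))]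
    exact pvRegA_keys _ d
  · rw [pvRegA_keys]

theorem pvStepA_getD (b : List String) (d : PySem.Dict String Int) (k : String) :
    (pvStepA d b).getD k 0 = d.getD k 0 + ((pvFirsts [b]).count k : Int) := by
  unfold pvStepA
  split_ifs with h
  · obtain ⟨c, bs, rfl⟩ : ∃ c bs, b = c :: bs := by
      cases b with
      | nil => simp at h
      | cons c bs => exact ⟨c, bs, rfl⟩
    have hfl : pvFirsts [c :: bs] = [c] := by
      simp [pvFirsts, PySem.List.pyGetD_zero_cons]
    rw [PySem.List.pyGetD_zero_cons, PySem.Dict.getD_modify, hfl]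
    split_ifs with hk
    · subst hk
      rw [pvRegA_getD]
      simp
      ring
    · rw [pvRegA_getD]
      simp [Ne.symm hk]
  · obtain rfl : b = [] := by
      cases b with
      | nil => rfl
      | cons c bs => simp at h
    have hfl : pvFirsts [([] : List String)] = [] := by simp [pvFirsts]
    rw [hfl]
    simp [pvRegA]

theorem pvFoldA_keys (L : List (List String)) (d : PySem.Dict String Int) :
    (L.foldl pvStepA d).keys = PySem.Set.update d.keys (L.flatMap (fun b => b)) := by
  induction L generalizing d with
  | nil => simp [PySem.Set.update_nil]
  | cons b L ih =>
    simp only [List.foldl_cons, List.flatMap_cons]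
    rw [ih, pvStepA_keys, PySem.Set.update_append]

theorem pvFirsts_cons (b : List String) (L : List (List String)) :
    pvFirsts (b :: L) = pvFirsts [b] ++ pvFirsts L := by
  unfold pvFirsts
  by_cases h : 0 < b.length <;> simp [h]

theorem pvFoldA_getD (L : List (List String)) (d : PySem.Dict String Int) (k : String) :
    (L.foldl pvStepA d).getD k 0 = d.getD k 0 + ((pvFirsts L).count k : Int) := by
  induction L generalizing d with
  | nil => simp [pvFirsts]
  | cons b L ih =>
    simp only [List.foldl_cons]
    rw [ih, pvStepA_getD, pvFirsts_cons b L, List.count_append]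
    push_cast
    ring

theorem pvFoldA_nodup (L : List (List String)) (d : PySem.Dict String Int)
    (h : d.keys.Nodup) : (L.foldl pvStepA d).keys.Nodup := by
  rw [pvFoldA_keys]
  exact PySem.Set.nodup_update _ _ h

-- B's per-key scan counts exactly the occurrences of k among the first choices
theorem pvCountFirstB_aux (L : List (List String)) (k : String) (s : Int) :
    L.foldl (fun acc b => if 0 < b.length && PySem.List.pyGetD b 0 "" == k then acc + 1 else acc) s
      = s + ((pvFirsts L).count k : Int) := by
  induction L generalizing s with
  | nil => simp [pvFirsts]
  | cons b L ih =>
    simp only [List.foldl_cons]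
    rw [ih, pvFirsts_cons, List.count_append]
    by_cases h : 0 < b.length
    · have hfl : pvFirsts [b] = [PySem.List.pyGetD b 0 ""] := by simp [pvFirsts, h]
      rw [hfl]
      by_cases hk : PySem.List.pyGetD b 0 "" = k
      · simp [h, hk]; ring
      · simp [h, hk]
    · have hfl : pvFirsts [b] = [] := by simp [pvFirsts, h]
      simp [hfl, h]

theorem pvCountFirstB_eq (L : List (List String)) (k : String) :
    pvCountFirstB L k = ((pvFirsts L).count k : Int) := by
  unfold pvCountFirstB
  rw [pvCountFirstB_aux]
  simp

theorem pv_main (L : List (List String)) :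
    count_first_choices L = count_first_choices_alt L := by
  unfold count_first_choices count_first_choices_alt pvKeysB
  have hkA : (L.foldl pvStepA PySem.Dict.empty).keys
      = PySem.Set.ofList (L.flatMap (fun b => b)) := by
    rw [pvFoldA_keys, PySem.Dict.keys_empty, PySem.Set.update_nil_left]
  have hndA : (L.foldl pvStepA PySem.Dict.empty).keys.Nodup :=
    pvFoldA_nodup L _ (by simp [PySem.Dict.keys_empty])
  rw [PySem.Dict.items_eq_map_keys _ hndA 0, hkA]
  apply List.map_congr_left
  intro k _
  rw [pvFoldA_getD, pvCountFirstB_eq]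
  simp [PySem.Dict.getD_empty]

-- ===== VERDICT (by name: the statement is the Claim_ definition above) =====
theorem count_first_choices_spec : Claim_equal_count_first_choices := by
  intro L _
  exact pv_main L
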